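-- pv_equiv track=rewrite | github.com/aijinsol/coding-tests | 프로그래머스/1/132267. 콜라 문제/콜라 문제.py | solution
-- ===== SOURCE A (Python) =====
-- def solution(a, b, n):
--     # a: empty bottle per new bottle (마트로부터 새 병을 받기 위한 비어있는 병 단위)
--     # b: new bottle 단위
--     # n: 현재 내가 가지고 있는 병 수
--
--     # new: 마트에서 새로 받는 병 수
--     # leftover: 수중에 남아있는 병 수
--     ans = 0
--     while n >= a:
--         tmp, leftover = divmod(n, a)
--         new = tmp * b
--         ans += new
--         n = leftover + new
--     return ans
-- ===== SOURCE B (Python) =====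
-- def solution(a, b, n):
--     # Closed form: each exchange of a empties for b new bottles removes a-b
--     # bottles from circulation; with n bottles we can keep exchanging while
--     # at least a remain, so the number of exchanged units is (n-b)//(a-b).
--     if n < a:
--         return 0
--     return (n - b) // (a - b) * b
-- ===== Notes on version B (the rewrite author's own statement) =====
-- stated objective: simpler
-- what changed: Replaced the bottle-exchange simulation loop with the direct closed form (n-b)//(a-b)*b (0 when n<a).
-- outside the precondition, e.g. on solution(3, -1, 6): A returns -2, B returns -1; on solution(-5, 1, 6): A returns -2, B returns -1
import Mathlib
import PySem

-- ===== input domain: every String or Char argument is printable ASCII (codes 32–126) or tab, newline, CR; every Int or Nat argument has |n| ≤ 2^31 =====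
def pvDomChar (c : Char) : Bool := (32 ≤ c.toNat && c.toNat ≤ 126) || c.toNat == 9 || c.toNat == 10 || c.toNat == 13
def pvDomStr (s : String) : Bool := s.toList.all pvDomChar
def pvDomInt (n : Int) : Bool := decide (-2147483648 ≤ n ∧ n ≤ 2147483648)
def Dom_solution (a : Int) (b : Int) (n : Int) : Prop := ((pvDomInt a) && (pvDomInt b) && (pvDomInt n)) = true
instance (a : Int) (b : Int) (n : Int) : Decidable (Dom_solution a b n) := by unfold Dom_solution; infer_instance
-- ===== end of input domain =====

-- B replaces A's exchange-simulation loop with the direct closed form (n-b)//(a-b)*b (simpler).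


-- ===== PORT A =====
-- the while loop, fuel only for totality (inside Pre_ the bottle count strictly
-- decreases each iteration and stays ≥ 0, so fuel n.toNat + 1 is never exhausted)
def solutionLoop (a : Int) (b : Int) : Nat → Int → Int → Int
  | 0, ans, _ => ans
  | fuel + 1, ans, n =>
    if a ≤ n then
      let tmp := PySem.Int.floordiv n a
      let leftover := PySem.Int.mod n a
      let new := tmp * b
      solutionLoop a b fuel (ans + new) (leftover + new)
    else ans

def solution (a : Int) (b : Int) (n : Int) : Int :=
  solutionLoop a b (n.toNat + 1) 0 n

-- ===== PORT B =====
def solution_alt (a : Int) (b : Int) (n : Int) : Int :=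
  if n < a then 0 else PySem.Int.floordiv (n - b) (a - b) * b

-- ===== PRECONDITION & SPEC =====
-- Pre_ restricts to the task's natural domain (0 ≤ b < a, the exchange must consume
-- bottles) together with every trivial input n < a (where the loop never runs).
-- Outside it A diverges (a ≤ b ≤ n), raises ZeroDivisionError (a = 0 ≤ n), or returns
-- values of a meaningless negative-bottle simulation that no caller would specify.
def Pre_solution (a : Int) (b : Int) (n : Int) : Prop := n < a ∨ (0 ≤ b ∧ b < a)
instance (a : Int) (b : Int) (n : Int) : Decidable (Pre_solution a b n) := by unfold Pre_solution; infer_instance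
def pvWitness_solution : Int × Int × Int := (3, 1, 20)

def Spec_solution (a : Int) (b : Int) (n : Int) (out : Int) : Prop := out = solution_alt a b n
instance (a : Int) (b : Int) (n : Int) (out : Int) : Decidable (Spec_solution a b n out) := by unfold Spec_solution; infer_instance

-- ===== CLAIM (what is proved, stated in full; the proofs are below) =====
def Claim_equal_solution : Prop := ∀ (a : Int) (b : Int) (n : Int), Dom_solution a b n → Pre_solution a b n → Spec_solution a b n (solution a b n)

-- ===== LEMMAS AND PROOFS =====

-- closed form of one loop step folded into the final formula
theorem solutionLoop_closed (a b : Int) (hb : 0 ≤ b) (hba : b < a) :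
    ∀ (fuel : Nat) (n ans : Int), n.toNat < fuel →
      solutionLoop a b fuel ans n =
        ans + (if n < a then 0 else PySem.Int.floordiv (n - b) (a - b) * b) := by
  intro fuel
  induction fuel with
  | zero => intro n ans h; omega
  | succ f ih =>
    intro n ans h
    by_cases hna : a ≤ n
    · have ha : 0 < a := by omega
      have hq1 : 1 ≤ n / a := by
        rw [Int.le_ediv_iff_mul_le ha]; omega
      have hqa : n / a * a ≤ n := Int.ediv_mul_le n (by omega)
      have hmod0 : 0 ≤ n % a := Int.emod_nonneg n (by omega)
      have hmodlt : n % a < a := Int.emod_lt_of_pos n ha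
      have hdecomp : n % a + n / a * a = n := by
        have := Int.emod_add_ediv n a; linarith [Int.emod_add_ediv n a]
      have hqb : n / a * b ≤ n / a * a :=
        mul_le_mul_of_nonneg_left (le_of_lt hba) (by omega)
      have hbqb : b ≤ n / a * b := le_mul_of_one_le_left hb hq1
      -- the new bottle count
      set n' : Int := n % a + n / a * b with hn'
      have hn'lt : n' < n := by
        have : n / a * b < n / a * a :=
          mul_lt_mul_of_pos_left hba (by omega)
        omega
      have hn'0 : 0 ≤ n' := by positivity
      simp only [solutionLoop, if_pos hna]
      rw [PySem.Int.floordiv_eq_ediv_of_pos (by omega : (0:Int) < a),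
          PySem.Int.mod_eq_emod_of_pos (by omega : (0:Int) < a)]
      rw [ih n' (ans + n / a * b) (by omega)]
      rw [PySem.Int.floordiv_eq_ediv_of_pos (by omega : (0:Int) < a - b)]
      -- (n - b) / (a - b) = (n' - b) / (a - b) + n / a
      have hdiv : (n - b) / (a - b) = (n' - b) / (a - b) + n / a := by
        have hexp : n / a * (a - b) = n / a * a - n / a * b := by ring
        have hsub : n - b = n' - b + n / a * (a - b) := by omega
        rw [hsub, Int.add_mul_ediv_right _ _ (by omega : a - b ≠ 0)]
      by_cases hn'a : n' < a
      · have hz : (n' - b) / (a - b) = 0 :=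
          Int.ediv_eq_zero_of_lt (by omega) (by omega)
        simp only [if_pos hn'a, if_neg (by omega : ¬ n < a)]
        rw [PySem.Int.floordiv_eq_ediv_of_pos (by omega : (0:Int) < a - b), hdiv, hz]
        ring
      · simp only [if_neg hn'a, if_neg (by omega : ¬ n < a)]
        rw [PySem.Int.floordiv_eq_ediv_of_pos (by omega : (0:Int) < a - b), hdiv]
        ring
    · simp only [solutionLoop, if_neg hna, if_pos (by omega : n < a)]
      ring

-- ===== VERDICT (by name: the statement is the Claim_ definition above) =====
theorem solution_spec : Claim_equal_solution := by
  intro a b n _ hpre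
  unfold Spec_solution solution solution_alt
  rcases hpre with hlt | ⟨hb, hba⟩
  · -- loop never runs
    cases hfn : n.toNat + 1 with
    | zero => omega
    | succ f =>
      simp [solutionLoop, if_neg (by omega : ¬ a ≤ n), if_pos hlt]
  · rw [solutionLoop_closed a b hb hba (n.toNat + 1) n 0 (by omega)]
    ring_nf
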